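-- pv_equiv track=rewrite | github.com/LeoPgn/FIAP | 1&2_SEMESTRE/PYTHON/2023/Aula 10 - Revisão CK 1/Exercicios/exercicio3.py | calcula_soma_indice_impar
-- ===== SOURCE A (Python) =====
-- def calcula_soma_indice_impar (matriz, nlin, ncol):
--     listaB = []
--
--     for col in range (0,ncol):
--         soma = 0
--         for lin in range (0,nlin):
--             if (col % 2 != 0):
--                 soma+=matriz[lin][col]
--         if (col % 2 != 0): #if (soma != 0)
--             listaB.append(soma)
--
--     return (listaB)
-- ===== SOURCE B (Python) =====
-- def calcula_soma_indice_impar(matriz, nlin, ncol):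
--     cols = range(1, ncol, 2)
--     sums = [0] * len(cols)
--     if not cols:
--         return sums
--     for lin in range(nlin):
--         row = matriz[lin]
--         sums = [s + row[c] for s, c in zip(sums, cols)]
--     return sums
-- ===== Notes on version B (the rewrite author's own statement) =====
-- stated objective: alternative
-- what changed: Replaces A's column-by-column rescans (with a parity guard re-tested inside every inner iteration and even columns scanned for nothing) by one row-major pass that precomputes the odd column indices once and accumulates all their totals simultaneously with a zip update, skipping the pass entirely when there are no odd columns.
import Mathlib
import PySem

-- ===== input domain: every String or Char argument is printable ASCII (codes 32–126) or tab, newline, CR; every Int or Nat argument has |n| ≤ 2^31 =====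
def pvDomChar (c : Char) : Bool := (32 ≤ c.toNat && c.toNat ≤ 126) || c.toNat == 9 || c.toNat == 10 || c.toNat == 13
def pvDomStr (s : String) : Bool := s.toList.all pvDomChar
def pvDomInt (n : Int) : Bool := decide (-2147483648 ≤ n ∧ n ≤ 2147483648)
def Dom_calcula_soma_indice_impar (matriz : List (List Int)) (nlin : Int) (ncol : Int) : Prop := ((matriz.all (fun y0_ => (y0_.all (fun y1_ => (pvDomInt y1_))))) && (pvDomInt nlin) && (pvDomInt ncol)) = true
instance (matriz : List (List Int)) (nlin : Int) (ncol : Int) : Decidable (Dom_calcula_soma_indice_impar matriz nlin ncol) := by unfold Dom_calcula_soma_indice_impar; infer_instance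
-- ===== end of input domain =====

-- B replaces A's per-column rescans (parity guard re-tested in every inner iteration) by one
-- row-major pass over the precomputed odd column indices, accumulating all column totals at once.

-- ===== PORT A =====
-- inner loop of A: soma accumulated over lin in range(0, nlin)
def pvSomaCol (matriz : List (List Int)) (nlin : Int) (col : Int) : Int :=
  (PySem.List.pyRange 0 nlin 1).foldl
    (fun soma lin =>
      if col % 2 ≠ 0 then
        soma + PySem.List.pyGetD (PySem.List.pyGetD matriz lin []) col 0
      else soma) 0

def calcula_soma_indice_impar (matriz : List (List Int)) (nlin : Int) (ncol : Int) : List Int :=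
  (PySem.List.pyRange 0 ncol 1).foldl
    (fun listaB col =>
      let soma := pvSomaCol matriz nlin col
      if col % 2 ≠ 0 then listaB ++ [soma] else listaB) []

-- ===== PORT B =====
def calcula_soma_indice_impar_alt (matriz : List (List Int)) (nlin : Int) (ncol : Int) : List Int :=
  let cols := PySem.List.pyRange 1 ncol 2
  let sums := List.replicate cols.length 0
  if cols.isEmpty then sums
  else
    (PySem.List.pyRange 0 nlin 1).foldl
      (fun sums lin =>
        let row := PySem.List.pyGetD matriz lin []
        (sums.zip cols).map (fun sc => sc.1 + PySem.List.pyGetD row sc.2 0)) sums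

-- ===== PRECONDITION & SPEC =====
-- Pre_ excludes exactly the inputs on which the Python A raises an IndexError: when there is an odd
-- column (ncol ≥ 2) and at least one row is scanned (nlin ≥ 1), A reads matriz[lin][col] for every
-- lin < nlin and every odd col < ncol, so every such row and index must exist (B raises on exactly
-- the same inputs).
def Pre_calcula_soma_indice_impar (matriz : List (List Int)) (nlin : Int) (ncol : Int) : Prop :=
  2 ≤ ncol → 1 ≤ nlin →
    (nlin ≤ (matriz.length : Int) ∧
      ∀ row ∈ matriz.take nlin.toNat,
        (if ncol % 2 = 0 then ncol - 1 else ncol - 2) < (row.length : Int))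
instance (matriz : List (List Int)) (nlin : Int) (ncol : Int) : Decidable (Pre_calcula_soma_indice_impar matriz nlin ncol) := by unfold Pre_calcula_soma_indice_impar; infer_instance

def pvWitness_calcula_soma_indice_impar : List (List Int) × Int × Int := ([[1, 2], [3, 4]], 2, 2)

def Spec_calcula_soma_indice_impar (matriz : List (List Int)) (nlin : Int) (ncol : Int) (out : List Int) : Prop := out = calcula_soma_indice_impar_alt matriz nlin ncol
instance (matriz : List (List Int)) (nlin : Int) (ncol : Int) (out : List Int) : Decidable (Spec_calcula_soma_indice_impar matriz nlin ncol out) := by unfold Spec_calcula_soma_indice_impar; infer_instance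

-- ===== CLAIM (what is proved, stated in full; the proofs are below) =====
def Claim_equal_calcula_soma_indice_impar : Prop := ∀ (matriz : List (List Int)) (nlin : Int) (ncol : Int), Dom_calcula_soma_indice_impar matriz nlin ncol → Pre_calcula_soma_indice_impar matriz nlin ncol → Spec_calcula_soma_indice_impar matriz nlin ncol (calcula_soma_indice_impar matriz nlin ncol)

-- ===== LEMMAS AND PROOFS =====

-- A's outer loop: append-if-odd over a list is filter-then-map
theorem pv_foldl_append_if_odd (F : Int → Int) (l : List Int) (acc : List Int) :
    l.foldl (fun listaB col => if col % 2 ≠ 0 then listaB ++ [F col] else listaB) acc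
      = acc ++ (l.filter (fun c => decide (c % 2 ≠ 0))).map F := by
  induction l generalizing acc with
  | nil => simp
  | cons c l ih =>
    rw [List.foldl_cons, List.filter_cons]
    by_cases h : c % 2 ≠ 0
    · have hd : decide (c % 2 ≠ 0) = true := decide_eq_true h
      rw [if_pos h, ih, hd]
      simp
    · have hd : decide (c % 2 ≠ 0) = false := decide_eq_false h
      rw [if_neg h, ih, hd]
      simp

-- the odd members of range(0, n) are exactly range(1, n, 2), Nat core
theorem pv_range_filter_odd_nat (n : Nat) :
    (List.range n).filter (fun k => decide (k % 2 = 1))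
      = (List.range (n / 2)).map (fun j => 2 * j + 1) := by
  induction n with
  | zero => simp
  | succ n ih =>
    rw [List.range_succ, List.filter_append, ih]
    by_cases h : n % 2 = 1
    · have h2 : (n + 1) / 2 = n / 2 + 1 := by omega
      have h3 : 2 * (n / 2) + 1 = n := by omega
      simp [h, h2, List.range_succ, h3]
    · have h2 : (n + 1) / 2 = n / 2 := by omega
      simp [h, h2]

-- the odd members of range(0, ncol) are exactly range(1, ncol, 2)
theorem pv_filter_odd_pyRange (ncol : Int) :
    (PySem.List.pyRange 0 ncol 1).filter (fun c => decide (c % 2 ≠ 0))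
      = PySem.List.pyRange 1 ncol 2 := by
  rw [PySem.List.pyRange_of_pos 0 ncol (by norm_num : (0:Int) < 1),
      PySem.List.pyRange_of_pos 1 ncol (by norm_num : (0:Int) < 2)]
  have hc1 : (if 0 < ncol then ((ncol - 0 + 1 - 1) / 1).toNat else 0) = ncol.toNat := by
    split_ifs <;> omega
  have hc2 : (if 1 < ncol then ((ncol - 1 + 2 - 1) / 2).toNat else 0) = ncol.toNat / 2 := by
    split_ifs <;> omega
  rw [hc1, hc2, List.filter_map]
  have hpred : ((fun c => decide (c % 2 ≠ 0)) ∘ (fun k : Nat => (0 : Int) + 1 * (k : Int)))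
      = (fun k : Nat => decide (k % 2 = 1)) := by
    funext k
    simp only [Function.comp_apply]
    rw [decide_eq_decide]
    omega
  rw [hpred, pv_range_filter_odd_nat, List.map_map]
  refine List.map_congr_left (fun j _ => ?_)
  simp; ring

-- B's loop invariant: starting from cols.map h, folding the rows adds each row's cols-entries
theorem pv_B_fold (g : Int → Int → Int) (lins : List Int) (cols : List Int) (h : Int → Int) :
    lins.foldl (fun sums lin => ((sums.zip cols).map fun sc => sc.1 + g lin sc.2)) (cols.map h)
      = cols.map (fun c => h c + (lins.map (fun lin => g lin c)).sum) := by
  induction lins generalizing h with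
  | nil => simp
  | cons lin lins ih =>
    simp only [List.foldl_cons]
    have hz : (cols.map h).zip cols = cols.map (fun c => (h c, c)) := by
      have hzm := @List.zip_map' _ _ _ h id cols
      rw [List.map_id] at hzm
      simpa using hzm
    rw [hz, List.map_map]
    have hstep : ((fun sc : Int × Int => sc.1 + g lin sc.2) ∘ fun c => (h c, c))
        = (fun c => h c + g lin c) := rfl
    rw [hstep, ih (fun c => h c + g lin c)]
    refine List.map_congr_left (fun c _ => ?_)
    simp [add_assoc]

-- characterisation of A
theorem pv_A_char (matriz : List (List Int)) (nlin ncol : Int) :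
    calcula_soma_indice_impar matriz nlin ncol
      = (PySem.List.pyRange 1 ncol 2).map (fun c =>
          ((PySem.List.pyRange 0 nlin 1).map
            (fun lin => PySem.List.pyGetD (PySem.List.pyGetD matriz lin []) c 0)).sum) := by
  unfold calcula_soma_indice_impar
  simp only []
  rw [pv_foldl_append_if_odd (pvSomaCol matriz nlin) _ [], List.nil_append,
      pv_filter_odd_pyRange]
  refine List.map_congr_left (fun c hc => ?_)
  have hodd : c % 2 ≠ 0 := by
    rcases (PySem.List.mem_pyRange_iff_of_pos (by norm_num : (0:Int) < 2) c).1 hc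
      with ⟨h1, h2, k, hk⟩
    omega
  unfold pvSomaCol
  simp only [if_pos hodd]
  rw [PySem.List.foldl_add]
  simp

-- characterisation of B
theorem pv_B_char (matriz : List (List Int)) (nlin ncol : Int) :
    calcula_soma_indice_impar_alt matriz nlin ncol
      = (PySem.List.pyRange 1 ncol 2).map (fun c =>
          ((PySem.List.pyRange 0 nlin 1).map
            (fun lin => PySem.List.pyGetD (PySem.List.pyGetD matriz lin []) c 0)).sum) := by
  unfold calcula_soma_indice_impar_alt
  simp only []
  by_cases hemp : (PySem.List.pyRange 1 ncol 2).isEmpty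
  · rw [if_pos hemp]
    rw [List.isEmpty_iff] at hemp
    simp [hemp]
  · rw [if_neg hemp]
    rw [← List.map_const' (l := PySem.List.pyRange 1 ncol 2) (b := (0 : Int)),
        pv_B_fold (fun lin c => PySem.List.pyGetD (PySem.List.pyGetD matriz lin []) c 0)]
    refine List.map_congr_left (fun c _ => ?_)
    simp

-- ===== VERDICT (by name: the statement is the Claim_ definition above) =====
theorem calcula_soma_indice_impar_spec : Claim_equal_calcula_soma_indice_impar := by
  intro matriz nlin ncol _ _
  unfold Spec_calcula_soma_indice_impar
  rw [pv_A_char, pv_B_char]
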